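-- pv_equiv track=rewrite | github.com/amielajunio/CM2-extension | scripts/format_output.py | tokenize_collection_string
-- ===== SOURCE A (Python) =====
-- def tokenize_collection_string(s):
--     """
--     Trasforma una stringa tipo "[Cu < Or < (Cr, Py)]"
--     in una lista di token: ['[', 'Cu', '<', 'Or', '<', '(', 'Cr', ',', 'Py', ')', ']']
--     """
--     tokens = []
--     i = 0
--     while i < len(s):
--         c = s[i]
--         if c.isspace():
--             i += 1
--         elif c in "<(),[]":
--             tokens.append(c)
--             i += 1
--         else:
--             # ident = sequenza di caratteri non speciali
--             start = i
--             while i < len(s) and s[i] not in " <(),[]":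
--                 i += 1
--             tokens.append(s[start:i])
--     return tokens
-- ===== SOURCE B (Python) =====
-- import re
--
-- _TOKEN_RE = re.compile(r'[<(),\[\]]|[^\s<(),\[\]][^ <(),\[\]]*')
--
-- def tokenize_collection_string(s):
--     """
--     Trasforma una stringa tipo "[Cu < Or < (Cr, Py)]"
--     in una lista di token: ['[', 'Cu', '<', 'Or', '<', '(', 'Cr', ',', 'Py', ')', ']']
--     """
--     return _TOKEN_RE.findall(s)
-- ===== Notes on version B (the rewrite author's own statement) =====
-- stated objective: idiomatic
-- what changed: Replaced the hand-written index-based while-loop with an inner identifier-scanning loop and manual slicing by a single re.findall over a precompiled alternation (one branch for special characters, one for identifiers).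
import Mathlib
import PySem

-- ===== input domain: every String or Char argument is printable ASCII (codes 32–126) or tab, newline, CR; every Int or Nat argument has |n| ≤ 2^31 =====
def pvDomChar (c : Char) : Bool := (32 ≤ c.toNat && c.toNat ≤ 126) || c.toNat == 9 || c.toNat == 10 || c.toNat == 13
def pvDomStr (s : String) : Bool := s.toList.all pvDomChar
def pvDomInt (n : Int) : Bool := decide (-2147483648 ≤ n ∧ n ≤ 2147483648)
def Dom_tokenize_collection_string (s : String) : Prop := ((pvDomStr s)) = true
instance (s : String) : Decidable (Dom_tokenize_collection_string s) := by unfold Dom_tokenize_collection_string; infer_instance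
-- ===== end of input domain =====

-- B replaces A's hand-written index-based two-level character scan with a single
-- precompiled regex alternation handed to re.findall (idiomatic; same return value).

-- ===== PORT A =====
-- characters of the Python string literals " <(),[]" and "<(),[]"
def pvStopA : List Char := [' ', '<', '(', ')', ',', '[', ']']
def pvSpecialsA : List Char := ['<', '(', ')', ',', '[', ']']

-- inner while: advance i while i < len(s) and s[i] not in " <(),[]"
def tokA_scanEnd (cs : List Char) (i : Nat) : Nat :=
  if h : i < cs.length then
    if pvStopA.contains cs[i] then i else tokA_scanEnd cs (i + 1)
  else i
termination_by cs.length - i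

-- the inner while never moves i backwards (used only for termination of the outer loop)
theorem tokA_scanEnd_ge (cs : List Char) (i : Nat) : i ≤ tokA_scanEnd cs i := by
  unfold tokA_scanEnd
  split
  · split
    · exact Nat.le_refl i
    · exact Nat.le_trans (Nat.le_succ i) (tokA_scanEnd_ge cs (i + 1))
  · exact Nat.le_refl i
termination_by cs.length - i

-- on a non-space non-special character the inner while moves i strictly forward
-- (used only for termination of the outer loop)
theorem tokA_scanEnd_gt (cs : List Char) (i : Nat) (h : i < cs.length)
    (hs : ¬ PySem.Chars.isspace cs[i] = true) (hc : ¬ pvSpecialsA.contains cs[i] = true) :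
    i < tokA_scanEnd cs i := by
  rw [tokA_scanEnd, dif_pos h, if_neg ?_]
  · exact Nat.lt_of_lt_of_le (Nat.lt_succ_self i) (tokA_scanEnd_ge cs (i + 1))
  · intro hmem
    simp only [pvStopA, List.contains_cons, List.contains_nil, Bool.or_eq_true,
      beq_iff_eq, Bool.false_eq_true, or_false] at hmem
    rcases hmem with h1 | h1 | h1 | h1 | h1 | h1 | h1
    · rw [h1] at hs; exact hs (by decide)
    all_goals
      exact hc (by simp only [pvSpecialsA, List.contains_cons, List.contains_nil,
        Bool.or_eq_true, beq_iff_eq, Bool.false_eq_true, or_false]; tauto)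

-- outer while over the index i
def tokA_loop (cs : List Char) (i : Nat) : List String :=
  if h : i < cs.length then
    let c := cs[i]
    if PySem.Chars.isspace c then tokA_loop cs (i + 1)
    else if pvSpecialsA.contains c then String.mk [c] :: tokA_loop cs (i + 1)
    else
      String.mk (PySem.List.slice cs (some (i : Int)) (some ((tokA_scanEnd cs i : Nat) : Int)))
        :: tokA_loop cs (tokA_scanEnd cs i)
  else []
termination_by cs.length - i
decreasing_by
  · omega
  · omega
  · rename_i hs hc
    have := tokA_scanEnd_gt cs i h hs hc
    omega

def tokenize_collection_string (s : String) : List String :=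
  tokA_loop s.toList 0

-- ===== PORT B =====
-- B = re.findall(r'[<(),\[\]]|[^\s<(),\[\]][^ <(),\[\]]*', s), transcribed as the
-- left-to-right scan findall performs: at each position try the special-char branch,
-- then the identifier branch; on no match advance one character.
def pvSpecialB (c : Char) : Bool := ['<', '(', ')', ',', '[', ']'].contains c
-- ASCII portion of the regex class \s (exact on Dom_: only codes 32..126, 9, 10, 13 occur)
def pvWsB (c : Char) : Bool := [' ', '\t', '\n', '\x0b', '\x0c', '\r'].contains c
-- the continuation class [^ <(),\[\]]
def pvIdentContB (c : Char) : Bool := !(c == ' ' || pvSpecialB c)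

def tokB (cs : List Char) : List String :=
  match cs with
  | [] => []
  | c :: rest =>
    if pvSpecialB c then String.mk [c] :: tokB rest
    else if !(pvWsB c) then
      String.mk (c :: rest.takeWhile pvIdentContB) :: tokB (rest.dropWhile pvIdentContB)
    else tokB rest
termination_by cs.length
decreasing_by
  · simp
  · have := List.length_dropWhile_le pvIdentContB rest
    simp; omega
  · simp

def tokenize_collection_string_alt (s : String) : List String :=
  tokB s.toList

-- ===== PRECONDITION & SPEC =====
def Spec_tokenize_collection_string (s : String) (out : List String) : Prop := out = tokenize_collection_string_alt s
instance (s : String) (out : List String) : Decidable (Spec_tokenize_collection_string s out) := by unfold Spec_tokenize_collection_string; infer_instance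

-- ===== CLAIM (what is proved, stated in full; the proofs are below) =====
def Claim_equal_tokenize_collection_string : Prop := ∀ (s : String), Dom_tokenize_collection_string s → Spec_tokenize_collection_string s (tokenize_collection_string s)

-- ===== LEMMAS AND PROOFS =====

theorem char_eq_of_toNat {c d : Char} (h : c.toNat = d.toNat) : c = d := by
  apply Char.ext
  apply UInt32.toNat_inj.mp
  exact h

-- the two continuation predicates agree: " <(),[]" = ' ' plus the specials
theorem stop_eq_identCont (d : Char) : (!pvStopA.contains d) = pvIdentContB d := by
  simp [pvStopA, pvIdentContB, pvSpecialB]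
  tauto

-- characterisation of the inner while as takeWhile length
theorem tokA_scanEnd_eq (cs : List Char) (i : Nat) :
    tokA_scanEnd cs i = i + ((cs.drop i).takeWhile pvIdentContB).length := by
  rw [tokA_scanEnd]
  split
  · rename_i h
    rw [← List.getElem_cons_drop h, List.takeWhile_cons, ← stop_eq_identCont cs[i]]
    by_cases hc : pvStopA.contains cs[i] = true
    · rw [if_pos hc, hc]
      simp
    · rw [if_neg hc]
      rw [Bool.not_eq_true] at hc
      rw [hc]
      simp only [Bool.not_false, if_true, List.length_cons]
      rw [tokA_scanEnd_eq cs (i + 1)]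
      omega
  · rename_i h
    rw [List.drop_eq_nil_of_le (by omega)]
    simp
termination_by cs.length - i

-- on Dom characters Python's isspace and the regex class \s agree
theorem ws_of_isspace {c : Char} (hd : pvDomChar c = true)
    (hs : PySem.Chars.isspace c = true) : pvWsB c = true := by
  simp only [pvDomChar, Bool.or_eq_true, Bool.and_eq_true, decide_eq_true_eq, beq_iff_eq] at hd
  simp only [PySem.Chars.isspace, Bool.or_eq_true, Bool.and_eq_true, decide_eq_true_eq] at hs
  have hn : c.toNat = 32 ∨ c.toNat = 9 ∨ c.toNat = 10 ∨ c.toNat = 13 := by omega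
  simp only [pvWsB, List.contains_cons, List.contains_nil, Bool.or_eq_true, beq_iff_eq,
    Bool.false_eq_true, or_false]
  rcases hn with h | h | h | h
  · exact Or.inl (char_eq_of_toNat (d := ' ') h)
  · exact Or.inr (Or.inl (char_eq_of_toNat (d := '\t') h))
  · exact Or.inr (Or.inr (Or.inl (char_eq_of_toNat (d := '\n') h)))
  · exact Or.inr (Or.inr (Or.inr (Or.inr (Or.inr (char_eq_of_toNat (d := '\x0d') h)))))

theorem isspace_of_ws {c : Char} (hw : pvWsB c = true) : PySem.Chars.isspace c = true := by
  simp only [pvWsB, List.contains_cons, List.contains_nil, Bool.or_eq_true, beq_iff_eq,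
    Bool.false_eq_true, or_false] at hw
  rcases hw with h | h | h | h | h | h <;> rw [h] <;> decide

theorem not_special_of_isspace {c : Char} (hs : PySem.Chars.isspace c = true) :
    pvSpecialB c = false := by
  rw [← Bool.not_eq_true]
  intro hc
  simp only [pvSpecialB, List.contains_cons, List.contains_nil, Bool.or_eq_true, beq_iff_eq,
    Bool.false_eq_true, or_false] at hc
  rcases hc with h | h | h | h | h | h <;> rw [h] at hs <;> simp [PySem.Chars.isspace] at hs

theorem specialsA_eq_specialB (c : Char) : pvSpecialsA.contains c = pvSpecialB c := rfl

-- take/drop of length-of-takeWhile give takeWhile/dropWhile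
theorem take_takeWhile_len {α : Type} (p : α → Bool) (l : List α) :
    l.take ((l.takeWhile p).length) = l.takeWhile p := by
  induction l with
  | nil => rfl
  | cons a t ih =>
    rw [List.takeWhile_cons]
    by_cases h : p a = true
    · simp [h, ih]
    · simp [h]

theorem drop_takeWhile_len {α : Type} (p : α → Bool) (l : List α) :
    l.drop ((l.takeWhile p).length) = l.dropWhile p := by
  induction l with
  | nil => rfl
  | cons a t ih =>
    rw [List.takeWhile_cons, List.dropWhile_cons]
    by_cases h : p a = true
    · simp [h, ih]
    · simp [h]

-- main equivalence: A's index loop from i equals B's scan of the remaining characters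
theorem tokA_loop_eq_tokB (cs : List Char) (hd : cs.all pvDomChar = true) (i : Nat) :
    tokA_loop cs i = tokB (cs.drop i) := by
  rw [tokA_loop]
  split
  · rename_i h
    have hdc : pvDomChar cs[i] = true := by
      rw [List.all_eq_true] at hd
      exact hd _ (List.getElem_mem h)
    rw [← List.getElem_cons_drop h, tokB]
    by_cases hs : PySem.Chars.isspace cs[i] = true
    · -- whitespace: both skip
      have hns := not_special_of_isspace hs
      have hw := ws_of_isspace hdc hs
      simp only [hs, if_true, hns, Bool.false_eq_true, if_false, hw, Bool.not_true,
        Bool.false_eq_true, if_false]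
      exact tokA_loop_eq_tokB cs hd (i + 1)
    · have hs' : PySem.Chars.isspace cs[i] = false := by rwa [← Bool.not_eq_true]
      by_cases hsp : pvSpecialB cs[i] = true
      · -- special character: one-char token on both sides
        simp only [hs', Bool.false_eq_true, if_false, specialsA_eq_specialB, hsp, if_true]
        rw [tokA_loop_eq_tokB cs hd (i + 1)]
      · -- identifier token
        have hsp' : pvSpecialB cs[i] = false := by rwa [← Bool.not_eq_true]
        have hw' : pvWsB cs[i] = false := by
          rw [← Bool.not_eq_true]
          intro hww
          exact hs (isspace_of_ws hww)
        simp only [hs', Bool.false_eq_true, if_false, specialsA_eq_specialB, hsp',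
          hw', Bool.not_false, if_true]
        have hscan := tokA_scanEnd_eq cs i
        rw [← List.getElem_cons_drop h, List.takeWhile_cons] at hscan
        have hcont : pvIdentContB cs[i] = true := by
          simp only [pvIdentContB, hsp', Bool.or_false, Bool.not_eq_eq_eq_not, Bool.not_true,
        beq_eq_false_iff_ne, ne_eq]
          intro he
          rw [he] at hs'
          simp [PySem.Chars.isspace] at hs'
        rw [hcont, if_pos rfl] at hscan
        rw [List.length_cons] at hscan
        refine congrArg₂ List.cons ?_ ?_
        · -- the appended token: the slice is the head char plus takeWhile
          rw [hscan, PySem.List.slice_natCast]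
          rw [Nat.add_sub_cancel_left, ← List.getElem_cons_drop h, List.take_succ_cons,
            take_takeWhile_len]
        · -- the tails agree
          rw [tokA_loop_eq_tokB cs hd (tokA_scanEnd cs i), hscan]
          rw [show ∀ n : Nat, i + (n + 1) = i + 1 + n from fun n => by omega]
          rw [← List.drop_drop, drop_takeWhile_len]
  · rename_i h
    rw [List.drop_eq_nil_of_le (by omega), tokB]
termination_by cs.length - i
decreasing_by
  · omega
  · omega
  · have h : i < cs.length := by assumption
    have hgt := tokA_scanEnd_gt cs i h hs (by rw [specialsA_eq_specialB]; exact hsp)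
    omega

-- ===== VERDICT (by name: the statement is the Claim_ definition above) =====
theorem tokenize_collection_string_spec : Claim_equal_tokenize_collection_string := by
  intro s hd
  unfold Spec_tokenize_collection_string tokenize_collection_string tokenize_collection_string_alt
  rw [tokA_loop_eq_tokB s.toList hd 0, List.drop_zero]
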